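-- pv_equiv track=rewrite | github.com/alambuyachelsea/Soil-Sentry | soil_sensor.py | convert_soil_moisture_to_scale
-- ===== SOURCE A (Python) =====
-- def convert_soil_moisture_to_scale(reading):
--     thresholds = [
--         (24293, 0),  # Air in a dry room
--         (24093, 1),  # Extremely dry soil
--         (21060, 2),  # Dry soil
--         (17684, 3),  # lightly watered soil
--         (15991, 4),  # heavily watered soil
--         (13713, 5)   # 100% water
--     ]
--
--     for threshold, scale_value in thresholds:
--         if reading >= threshold:
--             return scale_value
--     return 5  # Default to 5 if below the lowest threshold
-- ===== SOURCE B (Python) =====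
-- import bisect
--
-- _BOUNDARIES = [13713, 15991, 17684, 21060, 24093, 24293]
--
-- def convert_soil_moisture_to_scale(reading):
--     cnt = bisect.bisect_right(_BOUNDARIES, reading)
--     return min(5, 6 - cnt)
-- ===== Notes on version B (the rewrite author's own statement) =====
-- stated objective: idiomatic
-- what changed: Replaced the descending linear scan over (threshold, scale) pairs by a binary search (bisect_right) on the ascending boundary list, mapping the count of met thresholds to the scale with a clamped subtraction.
import Mathlib
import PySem

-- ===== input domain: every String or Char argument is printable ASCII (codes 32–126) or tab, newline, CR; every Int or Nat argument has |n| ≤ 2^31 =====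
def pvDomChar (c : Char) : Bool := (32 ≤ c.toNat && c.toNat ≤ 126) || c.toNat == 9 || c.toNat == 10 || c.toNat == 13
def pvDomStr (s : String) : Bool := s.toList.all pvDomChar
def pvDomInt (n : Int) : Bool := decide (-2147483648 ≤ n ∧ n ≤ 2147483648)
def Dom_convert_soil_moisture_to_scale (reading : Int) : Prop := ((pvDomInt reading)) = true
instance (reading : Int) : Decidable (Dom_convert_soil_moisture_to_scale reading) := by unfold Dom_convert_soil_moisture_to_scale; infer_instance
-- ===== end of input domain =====

-- B replaces A's descending linear scan with bisect_right on the ascending boundary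
-- list plus the arithmetic map min(5, 6 - cnt); objective: idiomatic.

-- ===== PORT A =====
-- the early-returning for-loop over the (threshold, scale) pairs
def pvScan (reading : Int) : List (Int × Int) → Int
  | [] => 5
  | (t, s) :: rest => if reading ≥ t then s else pvScan reading rest

def convert_soil_moisture_to_scale (reading : Int) : Int :=
  pvScan reading
    [(24293, 0), (24093, 1), (21060, 2), (17684, 3), (15991, 4), (13713, 5)]

-- ===== PORT B =====
-- bisect.bisect_right, transliterated as the standard halving search (fuel = length
-- bound only makes the recursion structurally total)
def pvBisectRight (x : Int) (l : List Int) : Nat → Nat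
  | 0 => 0
  | fuel + 1 =>
    match l with
    | [] => 0
    | _ :: _ =>
      let m := l.length / 2
      if l.getD m 0 ≤ x then m + 1 + pvBisectRight x (l.drop (m + 1)) fuel
      else pvBisectRight x (l.take m) fuel

def convert_soil_moisture_to_scale_alt (reading : Int) : Int :=
  let boundaries : List Int := [13713, 15991, 17684, 21060, 24093, 24293]
  let cnt : Int := pvBisectRight reading boundaries boundaries.length
  min 5 (6 - cnt)

-- ===== PRECONDITION & SPEC =====
def Spec_convert_soil_moisture_to_scale (reading : Int) (out : Int) : Prop := out = convert_soil_moisture_to_scale_alt reading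
instance (reading : Int) (out : Int) : Decidable (Spec_convert_soil_moisture_to_scale reading out) := by unfold Spec_convert_soil_moisture_to_scale; infer_instance

-- ===== CLAIM (what is proved, stated in full; the proofs are below) =====
def Claim_equal_convert_soil_moisture_to_scale : Prop := ∀ (reading : Int), Dom_convert_soil_moisture_to_scale reading → Spec_convert_soil_moisture_to_scale reading (convert_soil_moisture_to_scale reading)

-- ===== LEMMAS AND PROOFS =====

-- ===== VERDICT (by name: the statement is the Claim_ definition above) =====
theorem convert_soil_moisture_to_scale_spec : Claim_equal_convert_soil_moisture_to_scale := by
  intro r _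
  unfold Spec_convert_soil_moisture_to_scale convert_soil_moisture_to_scale
    convert_soil_moisture_to_scale_alt
  simp only [pvScan, pvBisectRight, List.length, List.getD, List.drop, List.take,
    List.getElem?_cons_zero, List.getElem?_cons_succ]
  norm_num
  split_ifs <;> omega
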